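-- pv_equiv track=rewrite | github.com/electricwildflower/proxmox-ldc | vm_console_launcher.py | _spice_config_supports_remote
-- ===== SOURCE A (Python) =====
-- def _spice_config_supports_remote(config: str) -> bool:
--     has_network = False
--     for raw_line in config.splitlines():
--         line = raw_line.strip()
--         if not line or "=" not in line:
--             continue
--         key, value = line.split("=", 1)
--         key = key.strip().lower()
--         value = value.strip()
--         if key in {"host", "proxy"}:
--             has_network = True
--             if value.startswith("/") or value.startswith("unix"):
--                 return False
--     return has_network
-- ===== SOURCE B (Python) =====
-- def _spice_config_supports_remote(config: str) -> bool:
--     # Collect all host/proxy values first, then judge the collection.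
--     entries = []
--     for raw_line in config.splitlines():
--         line = raw_line.strip()
--         if "=" in line:
--             key, value = line.split("=", 1)
--             if key.strip().lower() in ("host", "proxy"):
--                 entries.append(value.strip())
--     if any(v.startswith("/") or v.startswith("unix") for v in entries):
--         return False
--     return len(entries) > 0
-- ===== Notes on version B (the rewrite author's own statement) =====
-- stated objective: alternative
-- what changed: B replaces A's inline early-return-with-flag scan by a build-then-evaluate decomposition: one pass collects all host/proxy values into a list, then an aggregate check over that list decides the result.
import Mathlib
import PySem

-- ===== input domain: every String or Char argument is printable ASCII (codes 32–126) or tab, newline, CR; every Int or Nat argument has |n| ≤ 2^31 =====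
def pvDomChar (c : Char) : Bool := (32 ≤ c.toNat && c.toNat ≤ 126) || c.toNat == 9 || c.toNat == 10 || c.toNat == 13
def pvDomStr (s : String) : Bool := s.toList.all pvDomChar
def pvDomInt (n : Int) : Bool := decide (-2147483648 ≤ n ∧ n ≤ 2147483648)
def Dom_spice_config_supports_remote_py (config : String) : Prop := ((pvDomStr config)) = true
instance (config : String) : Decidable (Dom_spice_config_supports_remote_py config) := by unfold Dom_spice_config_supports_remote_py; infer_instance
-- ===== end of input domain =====

-- B replaces A's inline early-return-with-flag scan by a build-then-evaluate decomposition
-- (collect all host/proxy values, then judge the collection); alternative, same cost.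

-- ===== PORT A =====
-- 'for raw_line in …' with early return and the has_network flag, as structural recursion.
def pvALoop : List String → Bool → Bool
  | [], has_network => has_network
  | raw_line :: rest, has_network =>
    let line := PySem.Str.strip raw_line
    if line == "" || !PySem.Str.isIn "=" line then pvALoop rest has_network
    else
      let parts := (PySem.Str.splitMax? line "=" 1).getD []
      let key := PySem.Str.lower (PySem.Str.strip (parts.getD 0 ""))
      let value := PySem.Str.strip (parts.getD 1 "")
      if key == "host" || key == "proxy" then
        if PySem.Str.startswith value "/" || PySem.Str.startswith value "unix" then false
        else pvALoop rest true
      else pvALoop rest has_network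

def spice_config_supports_remote_py (config : String) : Bool :=
  pvALoop (PySem.Str.splitlines config) false

-- ===== PORT B =====
def spice_config_supports_remote_py_alt (config : String) : Bool :=
  let entries := (PySem.Str.splitlines config).foldl (fun entries raw_line =>
    let line := PySem.Str.strip raw_line
    if PySem.Str.isIn "=" line then
      let parts := (PySem.Str.splitMax? line "=" 1).getD []
      let key := parts.getD 0 ""
      let value := parts.getD 1 ""
      if PySem.Str.lower (PySem.Str.strip key) == "host" ||
         PySem.Str.lower (PySem.Str.strip key) == "proxy" then
        entries ++ [PySem.Str.strip value]
      else entries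
    else entries) []
  if entries.any (fun v => PySem.Str.startswith v "/" || PySem.Str.startswith v "unix") then
    false
  else
    !entries.isEmpty

-- ===== PRECONDITION & SPEC =====
def Spec_spice_config_supports_remote_py (config : String) (out : Bool) : Prop := out = spice_config_supports_remote_py_alt config
instance (config : String) (out : Bool) : Decidable (Spec_spice_config_supports_remote_py config out) := by unfold Spec_spice_config_supports_remote_py; infer_instance

-- ===== CLAIM (what is proved, stated in full; the proofs are below) =====
def Claim_equal_spice_config_supports_remote_py : Prop := ∀ (config : String), Dom_spice_config_supports_remote_py config → Spec_spice_config_supports_remote_py config (spice_config_supports_remote_py config)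

-- ===== LEMMAS AND PROOFS =====

-- the entry (if any) a single line contributes in B
def pvEntryOf (raw_line : String) : List String :=
  let line := PySem.Str.strip raw_line
  if PySem.Str.isIn "=" line then
    let parts := (PySem.Str.splitMax? line "=" 1).getD []
    if PySem.Str.lower (PySem.Str.strip (parts.getD 0 "")) == "host" ||
       PySem.Str.lower (PySem.Str.strip (parts.getD 0 "")) == "proxy" then
      [PySem.Str.strip (parts.getD 1 "")]
    else []
  else []

def pvBad (v : String) : Bool :=
  PySem.Str.startswith v "/" || PySem.Str.startswith v "unix"

lemma pvB_entries_eq (lines : List String) (acc : List String) :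
    lines.foldl (fun entries raw_line =>
      let line := PySem.Str.strip raw_line
      if PySem.Str.isIn "=" line then
        let parts := (PySem.Str.splitMax? line "=" 1).getD []
        let key := parts.getD 0 ""
        let value := parts.getD 1 ""
        if PySem.Str.lower (PySem.Str.strip key) == "host" ||
           PySem.Str.lower (PySem.Str.strip key) == "proxy" then
          entries ++ [PySem.Str.strip value]
        else entries
      else entries) acc = acc ++ lines.flatMap pvEntryOf := by
  have h : (fun (entries : List String) (raw_line : String) =>
      let line := PySem.Str.strip raw_line
      if PySem.Str.isIn "=" line then
        let parts := (PySem.Str.splitMax? line "=" 1).getD []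
        let key := parts.getD 0 ""
        let value := parts.getD 1 ""
        if PySem.Str.lower (PySem.Str.strip key) == "host" ||
           PySem.Str.lower (PySem.Str.strip key) == "proxy" then
          entries ++ [PySem.Str.strip value]
        else entries
      else entries) = fun entries raw_line => entries ++ pvEntryOf raw_line := by
    funext entries raw_line
    simp only [pvEntryOf]
    split_ifs <;> simp
  rw [h, PySem.List.foldl_append_eq_flatMap]

lemma pvALoop_eq (lines : List String) (hn : Bool) :
    pvALoop lines hn =
      (if (lines.flatMap pvEntryOf).any pvBad then false
       else hn || !(lines.flatMap pvEntryOf).isEmpty) := by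
  induction lines generalizing hn with
  | nil => simp [pvALoop]
  | cons raw rest ih =>
    simp only [pvALoop, List.flatMap_cons]
    by_cases h0 : (PySem.Str.strip raw == "" || !PySem.Str.isIn "=" (PySem.Str.strip raw)) = true
    · have hE : pvEntryOf raw = [] := by
        simp only [pvEntryOf]
        cases hb : (PySem.Str.strip raw == "") with
        | true =>
          rw [eq_of_beq hb]
          rw [if_neg (by decide)]
        | false =>
          simp only [hb, Bool.false_or, Bool.not_eq_true'] at h0
          rw [if_neg (by simpa using h0)]
      rw [if_pos h0, hE, List.nil_append, ih]
    · rw [if_neg h0]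
      have hin : PySem.Str.isIn "=" (PySem.Str.strip raw) = true := by
        cases hi : PySem.Str.isIn "=" (PySem.Str.strip raw) with
        | true => rfl
        | false => exact absurd (by simp only [Bool.or_eq_true, Bool.not_eq_true']; exact Or.inr hi) h0
      have hE : pvEntryOf raw =
          (if PySem.Str.lower (PySem.Str.strip
                (((PySem.Str.splitMax? (PySem.Str.strip raw) "=" 1).getD []).getD 0 "")) == "host" ||
              PySem.Str.lower (PySem.Str.strip
                (((PySem.Str.splitMax? (PySem.Str.strip raw) "=" 1).getD []).getD 0 "")) == "proxy" then
            [PySem.Str.strip (((PySem.Str.splitMax? (PySem.Str.strip raw) "=" 1).getD []).getD 1 "")]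
          else []) := by
        simp only [pvEntryOf]
        rw [if_pos hin]
      by_cases hkey : (PySem.Str.lower (PySem.Str.strip
            (((PySem.Str.splitMax? (PySem.Str.strip raw) "=" 1).getD []).getD 0 "")) == "host" ||
          PySem.Str.lower (PySem.Str.strip
            (((PySem.Str.splitMax? (PySem.Str.strip raw) "=" 1).getD []).getD 0 "")) == "proxy") = true
      · rw [if_pos hkey, hE, if_pos hkey, List.singleton_append, List.any_cons]
        by_cases hbad : (PySem.Str.startswith (PySem.Str.strip
              (((PySem.Str.splitMax? (PySem.Str.strip raw) "=" 1).getD []).getD 1 "")) "/" ||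
            PySem.Str.startswith (PySem.Str.strip
              (((PySem.Str.splitMax? (PySem.Str.strip raw) "=" 1).getD []).getD 1 "")) "unix") = true
        · rw [if_pos hbad]
          have : pvBad (PySem.Str.strip
              (((PySem.Str.splitMax? (PySem.Str.strip raw) "=" 1).getD []).getD 1 "")) = true := hbad
          rw [this, Bool.true_or, if_pos rfl]
        · rw [if_neg hbad, ih]
          have : pvBad (PySem.Str.strip
              (((PySem.Str.splitMax? (PySem.Str.strip raw) "=" 1).getD []).getD 1 "")) = false :=
            Bool.of_not_eq_true hbad
          rw [this, Bool.false_or]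
          cases h : (rest.flatMap pvEntryOf).any pvBad <;> simp
      · rw [if_neg hkey, hE, if_neg hkey, List.nil_append, ih]

-- ===== VERDICT (by name: the statement is the Claim_ definition above) =====
theorem spice_config_supports_remote_py_spec : Claim_equal_spice_config_supports_remote_py := by
  intro config _
  unfold Spec_spice_config_supports_remote_py spice_config_supports_remote_py spice_config_supports_remote_py_alt
  rw [pvB_entries_eq, List.nil_append, pvALoop_eq]
  rfl
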